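-- pv_equiv track=rewrite | github.com/valory-xyz/mech | benchmark/analyze.py | section_parse_breakdown
-- ===== SOURCE A (Python) =====
-- from collections import Counter, defaultdict
-- from typing import Any
--
-- def section_parse_breakdown(rows: list[dict[str, Any]]) -> str:
--     """Per-tool parse status breakdown."""
--     by_tool: dict[str, Counter] = defaultdict(Counter)
--     for row in rows:
--         by_tool[row.get("tool_name", "unknown")][row.get("prediction_parse_status", "unknown")] += 1
--
--     lines = [
--         "## Parse/Error Breakdown by Tool",
--         "",
--         "| Tool | Valid | Malformed | Missing | Error | Total |",
--         "|------|-------|-----------|---------|-------|-------|",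
--     ]
--     for tool in sorted(by_tool):
--         c = by_tool[tool]
--         total = sum(c.values())
--         lines.append(
--             f"| {tool} | {c.get('valid', 0)} | {c.get('malformed', 0)}"
--             f" | {c.get('missing_fields', 0)} | {c.get('error', 0)} | {total} |"
--         )
--
--     return "\n".join(lines)
-- ===== SOURCE B (Python) =====
-- def section_parse_breakdown(rows: list[dict[str, object]]) -> str:
--     """Per-tool parse status breakdown."""
--     lines = [
--         "## Parse/Error Breakdown by Tool",
--         "",
--         "| Tool | Valid | Malformed | Missing | Error | Total |",
--         "|------|-------|-----------|---------|-------|-------|",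
--     ]
--     tools = sorted({row.get("tool_name", "unknown") for row in rows})
--     for tool in tools:
--         statuses = [
--             row.get("prediction_parse_status", "unknown")
--             for row in rows
--             if row.get("tool_name", "unknown") == tool
--         ]
--         lines.append(
--             f"| {tool} | {statuses.count('valid')} | {statuses.count('malformed')}"
--             f" | {statuses.count('missing_fields')} | {statuses.count('error')} | {len(statuses)} |"
--         )
--     return "\n".join(lines)
-- ===== Notes on version B (the rewrite author's own statement) =====
-- stated objective: simpler
-- what changed: Replaces the one-pass defaultdict-of-Counters accumulation with collecting the sorted set of tool names and, per tool, counting statuses directly on a filtered list of rows.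
import Mathlib
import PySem

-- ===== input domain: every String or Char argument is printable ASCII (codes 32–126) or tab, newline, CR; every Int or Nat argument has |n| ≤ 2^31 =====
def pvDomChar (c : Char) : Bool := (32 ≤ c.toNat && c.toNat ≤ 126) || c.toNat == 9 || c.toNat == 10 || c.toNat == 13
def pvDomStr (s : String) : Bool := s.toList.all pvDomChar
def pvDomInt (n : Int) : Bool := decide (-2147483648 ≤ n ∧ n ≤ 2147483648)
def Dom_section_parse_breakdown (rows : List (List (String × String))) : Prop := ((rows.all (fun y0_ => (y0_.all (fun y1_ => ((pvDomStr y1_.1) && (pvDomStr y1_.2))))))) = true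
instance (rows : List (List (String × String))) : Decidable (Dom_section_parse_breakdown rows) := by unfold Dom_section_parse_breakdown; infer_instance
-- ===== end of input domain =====

-- B replaces A's one-pass defaultdict-of-Counters with a sorted set of tool names and a
-- per-tool direct count over the filtered rows; same output, a simpler decomposition.

-- ===== PORT A =====
def section_parse_breakdown (rows : List (List (String × String))) : String :=
  let byTool : PySem.Dict String (PySem.Dict String Int) :=
    rows.foldl (fun d row =>
      d.modify ((PySem.Dict.mk row).getD "tool_name" "unknown") PySem.Dict.empty
        (fun c => c.modify ((PySem.Dict.mk row).getD "prediction_parse_status" "unknown") 0 (· + 1)))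
      PySem.Dict.empty
  let lines : List String :=
    [ "## Parse/Error Breakdown by Tool",
      "",
      "| Tool | Valid | Malformed | Missing | Error | Total |",
      "|------|-------|-----------|---------|-------|-------|" ]
  let lines := (PySem.List.sorted byTool.keys (fun x => x) false).foldl (fun ls tool =>
    let c := byTool.getD tool PySem.Dict.empty
    let total := c.values.sum
    ls ++ ["| " ++ tool ++ " | " ++ PySem.Int.toStr (c.getD "valid" 0)
            ++ " | " ++ PySem.Int.toStr (c.getD "malformed" 0)
            ++ " | " ++ PySem.Int.toStr (c.getD "missing_fields" 0)
            ++ " | " ++ PySem.Int.toStr (c.getD "error" 0)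
            ++ " | " ++ PySem.Int.toStr total ++ " |"]) lines
  PySem.Str.join "\n" lines

-- ===== PORT B =====
def section_parse_breakdown_alt (rows : List (List (String × String))) : String :=
  let lines : List String :=
    [ "## Parse/Error Breakdown by Tool",
      "",
      "| Tool | Valid | Malformed | Missing | Error | Total |",
      "|------|-------|-----------|---------|-------|-------|" ]
  let tools := PySem.List.sorted
    (PySem.Set.ofList (rows.map (fun row => (PySem.Dict.mk row).getD "tool_name" "unknown")))
    (fun x => x) false
  let lines := tools.foldl (fun ls tool =>
    let statuses := (rows.filter (fun row =>
        (PySem.Dict.mk row).getD "tool_name" "unknown" == tool)).map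
      (fun row => (PySem.Dict.mk row).getD "prediction_parse_status" "unknown")
    ls ++ ["| " ++ tool ++ " | " ++ PySem.Int.toStr ((statuses.count "valid" : Nat) : Int)
            ++ " | " ++ PySem.Int.toStr ((statuses.count "malformed" : Nat) : Int)
            ++ " | " ++ PySem.Int.toStr ((statuses.count "missing_fields" : Nat) : Int)
            ++ " | " ++ PySem.Int.toStr ((statuses.count "error" : Nat) : Int)
            ++ " | " ++ PySem.Int.toStr ((statuses.length : Nat) : Int) ++ " |"]) lines
  PySem.Str.join "\n" lines

-- ===== PRECONDITION & SPEC =====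
def Spec_section_parse_breakdown (rows : List (List (String × String))) (out : String) : Prop := out = section_parse_breakdown_alt rows
instance (rows : List (List (String × String))) (out : String) : Decidable (Spec_section_parse_breakdown rows out) := by unfold Spec_section_parse_breakdown; infer_instance

-- ===== CLAIM (what is proved, stated in full; the proofs are below) =====
def Claim_equal_section_parse_breakdown : Prop := ∀ (rows : List (List (String × String))), Dom_section_parse_breakdown rows → Spec_section_parse_breakdown rows (section_parse_breakdown rows)

-- ===== LEMMAS AND PROOFS =====

-- per-key projection of A's grouping loop: the counter at key t only sees rows whose key is t
theorem getD_foldl_modify_key_filter {κ ν β : Type} [BEq κ] [LawfulBEq κ] [DecidableEq κ]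
    (l : List β) (key : β → κ) (d0 : ν) (g : ν → β → ν) (d : PySem.Dict κ ν) (t : κ) :
    (l.foldl (fun d x => d.modify (key x) d0 (fun c => g c x)) d).getD t d0
      = (l.filter (fun x => key x == t)).foldl g (d.getD t d0) := by
  induction l generalizing d with
  | nil => rfl
  | cons x xs ih =>
    simp only [List.foldl_cons, List.filter_cons, ih]
    by_cases h : key x = t
    · simp [h]
    · simp [h, PySem.Dict.getD_modify, Ne.symm h]

-- the values of Counter(ss) sum to len(ss)
theorem sum_values_counter (ss : List String) :
    ((PySem.Dict.counter ss).values).sum = (ss.length : Int) := by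
  have hperm : (PySem.Set.ofList ss).Perm ss.dedup :=
    (List.perm_ext_iff_of_nodup (PySem.Set.nodup_ofList ss) ss.nodup_dedup).mpr
      (fun x => by rw [PySem.Set.mem_ofList, List.mem_dedup])
  have : (PySem.Dict.counter ss).values
      = (PySem.Set.ofList ss).map (fun k => (ss.count k : Int)) := by
    show ((PySem.Dict.counter ss).items).map (·.2) = _
    rw [PySem.Dict.items_counter, List.map_map]; rfl
  rw [this, (hperm.map _).sum_eq]
  have h2 : ss.dedup.map (fun k => ((List.count k ss : Nat) : Int))
      = (ss.dedup.map (fun x => List.count x ss)).map Int.ofNat := by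
    rw [List.map_map]; rfl
  have h3 : ((ss.dedup.map (fun x => List.count x ss)).map Int.ofNat).sum
      = (((ss.dedup.map (fun x => List.count x ss)).sum : Nat) : Int) := by push_cast; rfl
  rw [h2, h3, List.sum_map_count_dedup_eq_length]

theorem section_parse_breakdown_spec : Claim_equal_section_parse_breakdown := by
  intro rows _
  unfold Spec_section_parse_breakdown section_parse_breakdown section_parse_breakdown_alt
  simp only [PySem.List.foldl_append_singleton_eq_map]
  -- A's sorted key list is B's sorted tool list
  have hkeys : (rows.foldl (fun d row =>
      d.modify ((PySem.Dict.mk row).getD "tool_name" "unknown") PySem.Dict.empty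
        (fun c => c.modify ((PySem.Dict.mk row).getD "prediction_parse_status" "unknown") 0 (· + 1)))
      (PySem.Dict.empty : PySem.Dict String (PySem.Dict String Int))).keys
      = PySem.Set.ofList (rows.map (fun row => (PySem.Dict.mk row).getD "tool_name" "unknown")) := by
    rw [PySem.Dict.keys_foldl_modify_key rows
      (fun row => (PySem.Dict.mk row).getD "tool_name" "unknown") PySem.Dict.empty
      (fun _ row => fun c => c.modify ((PySem.Dict.mk row).getD "prediction_parse_status" "unknown") 0 (· + 1))]
    rw [PySem.Set.ofList_eq_foldl]
    rfl
  have hc : ∀ tool, (rows.foldl (fun d row =>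
      d.modify ((PySem.Dict.mk row).getD "tool_name" "unknown") PySem.Dict.empty
        (fun c => c.modify ((PySem.Dict.mk row).getD "prediction_parse_status" "unknown") 0 (· + 1)))
      PySem.Dict.empty).getD tool PySem.Dict.empty
      = PySem.Dict.counter ((rows.filter (fun row =>
          (PySem.Dict.mk row).getD "tool_name" "unknown" == tool)).map
        (fun row => (PySem.Dict.mk row).getD "prediction_parse_status" "unknown")) := by
    intro tool
    rw [getD_foldl_modify_key_filter rows
      (fun row => (PySem.Dict.mk row).getD "tool_name" "unknown") PySem.Dict.empty
      (fun c row => c.modify ((PySem.Dict.mk row).getD "prediction_parse_status" "unknown") 0 (· + 1))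
      PySem.Dict.empty tool]
    rw [PySem.Dict.counter_eq_foldl, List.foldl_map, PySem.Dict.getD_empty]
  simp only [hc, hkeys, sum_values_counter, PySem.Dict.getD_counter]
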